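-- pv_equiv track=rewrite | github.com/Poco-dev/python_mipt_dafe_tasks | solutions/sem01/lesson02/task4.py | get_multiplications_amount
-- ===== SOURCE A (Python) =====
-- def get_multiplications_amount(num: int) -> int:
--     multiplications_amount = 0
--     while num > 1:
--         if num % 2 == 0:
--             multiplications_amount += 1
--             num //= 2
--         else:
--             multiplications_amount += 1
--             num -= 1
--     return multiplications_amount
-- ===== SOURCE B (Python) =====
-- def get_multiplications_amount(num: int) -> int:
--     # Closed form: reaching one takes one halving per binary digit after the top
--     # one, plus one decrement per set bit below the top one.
--     if num <= 1:
--         return 0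
--     return num.bit_length() + bin(num).count('1') - 2
-- ===== Notes on version B (the rewrite author's own statement) =====
-- stated objective: simpler
-- what changed: Replaced the halve/decrement loop by a closed form read directly off the binary representation: bit length plus popcount minus two halvings-and-decrements already accounted for (and zero when num is already at most one).
import Mathlib
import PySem

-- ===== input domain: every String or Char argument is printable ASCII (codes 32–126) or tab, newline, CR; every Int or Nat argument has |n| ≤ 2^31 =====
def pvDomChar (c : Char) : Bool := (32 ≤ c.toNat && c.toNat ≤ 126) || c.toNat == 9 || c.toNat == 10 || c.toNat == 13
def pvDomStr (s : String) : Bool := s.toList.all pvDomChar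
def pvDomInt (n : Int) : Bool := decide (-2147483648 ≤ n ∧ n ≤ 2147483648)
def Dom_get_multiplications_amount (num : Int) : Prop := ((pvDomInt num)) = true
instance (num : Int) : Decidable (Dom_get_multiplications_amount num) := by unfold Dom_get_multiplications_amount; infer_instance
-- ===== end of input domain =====

-- B replaces A's halve/decrement loop by a closed form read off the binary representation (bit length plus popcount).


-- ===== PORT A =====
-- the while loop of A, carrying (num, multiplications_amount)
def gmaLoop (num : Int) (acc : Int) : Int :=
  if h : num > 1 then
    if PySem.Int.mod num 2 = 0 then gmaLoop (PySem.Int.floordiv num 2) (acc + 1)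
    else gmaLoop (num - 1) (acc + 1)
  else acc
termination_by num.toNat
decreasing_by
  · rw [PySem.Int.floordiv_eq_ediv_of_pos (by omega : (0:Int) < 2)]; omega
  · omega

def get_multiplications_amount (num : Int) : Int := gmaLoop num 0

-- ===== PORT B =====
-- num.bit_length() for nonnegative num
def bitLen : Nat → Nat
  | 0 => 0
  | n + 1 => bitLen ((n + 1) / 2) + 1

-- bin(num).count('1'), i.e. popcount, for nonnegative num
def popCnt : Nat → Nat
  | 0 => 0
  | n + 1 => popCnt ((n + 1) / 2) + (n + 1) % 2

def get_multiplications_amount_alt (num : Int) : Int :=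
  if num ≤ 1 then 0
  else (bitLen num.toNat : Int) + (popCnt num.toNat : Int) - 2

-- ===== PRECONDITION & SPEC =====
def Spec_get_multiplications_amount (num : Int) (out : Int) : Prop := out = get_multiplications_amount_alt num
instance (num : Int) (out : Int) : Decidable (Spec_get_multiplications_amount num out) := by unfold Spec_get_multiplications_amount; infer_instance

-- ===== CLAIM (what is proved, stated in full; the proofs are below) =====
def Claim_equal_get_multiplications_amount : Prop := ∀ (num : Int), Dom_get_multiplications_amount num → Spec_get_multiplications_amount num (get_multiplications_amount num)

-- ===== LEMMAS AND PROOFS =====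

lemma bitLen_pos (n : Nat) (h : 1 ≤ n) : bitLen n = bitLen (n / 2) + 1 := by
  cases n with
  | zero => omega
  | succ m => rw [bitLen]

lemma popCnt_pos (n : Nat) (h : 1 ≤ n) : popCnt n = popCnt (n / 2) + n % 2 := by
  cases n with
  | zero => omega
  | succ m => rw [popCnt]

lemma mod_cast_two (n : Nat) : PySem.Int.mod (n : Int) 2 = ((n % 2 : Nat) : Int) :=
  PySem.Int.mod_natCast n 2

lemma floordiv_cast_two (n : Nat) : PySem.Int.floordiv (n : Int) 2 = ((n / 2 : Nat) : Int) :=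
  PySem.Int.floordiv_natCast n 2

lemma gmaLoop_closed : ∀ (n : Nat), 1 ≤ n → ∀ (acc : Int),
    gmaLoop (n : Int) acc = acc + (bitLen n : Int) + (popCnt n : Int) - 2 := by
  intro n
  induction n using Nat.strong_induction_on with
  | _ n ih =>
    intro hn acc
    rw [gmaLoop]
    by_cases h1 : (n : Int) > 1
    · have hn2 : 2 ≤ n := by exact_mod_cast by omega
      rw [dif_pos h1, mod_cast_two]
      by_cases he : n % 2 = 0
      · rw [if_pos (by simp [he]), floordiv_cast_two]
        rw [ih (n / 2) (by omega) (by omega) (acc + 1)]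
        rw [bitLen_pos n (by omega), popCnt_pos n (by omega), he]
        push_cast; ring
      · have ho : n % 2 = 1 := by omega
        rw [if_neg (by simp [ho])]
        have hcast : (n : Int) - 1 = ((n - 1 : Nat) : Int) := by omega
        rw [hcast, ih (n - 1) (by omega) (by omega) (acc + 1)]
        have hb : bitLen n = bitLen (n - 1) := by
          rw [bitLen_pos n (by omega), bitLen_pos (n - 1) (by omega)]
          have : n / 2 = (n - 1) / 2 := by omega
          rw [this]
        have hp : popCnt n = popCnt (n - 1) + 1 := by
          rw [popCnt_pos n (by omega), popCnt_pos (n - 1) (by omega), ho]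
          have h2 : (n - 1) % 2 = 0 := by omega
          have h3 : n / 2 = (n - 1) / 2 := by omega
          rw [h2, h3]
        rw [hb, hp]; push_cast; ring
    · have : n = 1 := by omega
      subst this
      rw [dif_neg h1]
      have hb : bitLen 1 = 1 := by rw [bitLen_pos 1 le_rfl]; simp [bitLen]
      have hp : popCnt 1 = 1 := by rw [popCnt_pos 1 le_rfl]; simp [popCnt]
      rw [hb, hp]; push_cast; ring

-- ===== VERDICT (by name: the statement is the Claim_ definition above) =====
theorem get_multiplications_amount_spec : Claim_equal_get_multiplications_amount := by
  intro num _
  unfold Spec_get_multiplications_amount get_multiplications_amount get_multiplications_amount_alt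
  by_cases h : num ≤ 1
  · rw [if_pos h, gmaLoop, dif_neg (by omega)]
  · rw [if_neg h]
    have hc : ((num.toNat : Nat) : Int) = num := by omega
    have := gmaLoop_closed num.toNat (by omega) 0
    rw [hc] at this
    rw [this]; ring
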